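-- pv_equiv track=rewrite | github.com/hasrulmohamed-hm/ai-resume-screener | app.py | standardize_filename
-- ===== SOURCE A (Python) =====
-- def standardize_filename(filename):
--     """
--     Standardizes a filename to Title Case with underscores.
--     Example: 'john_doe-resume.pdf' -> 'John_Doe_Resume.pdf'
--     """
--     if '.' not in filename:
--         return filename
--
--     parts = filename.rsplit('.', 1)
--     name = parts[0]
--     ext = parts[1].lower()
--
--     # Replace common separators with space
--     name = name.replace('_', ' ').replace('-', ' ')
--     # Switch to Title Case
--     name = ' '.join(word.capitalize() for word in name.split())
--     # Replace spaces with underscores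
--     name = name.replace(' ', '_')
--
--     return f"{name}.{ext}"
-- ===== SOURCE B (Python) =====
-- def standardize_filename(filename):
--     """Single character-by-character scan over the name part instead of
--     replace+split+capitalize+join; same rsplit guard and extension lowering."""
--     if '.' not in filename:
--         return filename
--     name, ext = filename.rsplit('.', 1)
--     out = []
--     new_word = True
--     for ch in name:
--         if ch == '_' or ch == '-' or ch.isspace():
--             new_word = True
--         else:
--             if new_word and out:
--                 out.append('_')
--             out.append(ch.upper() if new_word else ch.lower())
--             new_word = False
--     return ''.join(out) + '.' + ext.lower()
-- ===== Notes on version B (the rewrite author's own statement) =====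
-- stated objective: alternative
-- what changed: The name part is rebuilt in one character-by-character scan with a new-word flag (emitting underscores and case changes on the fly) instead of A's replace/split/capitalize/join/replace pipeline of five passes.
import Mathlib
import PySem

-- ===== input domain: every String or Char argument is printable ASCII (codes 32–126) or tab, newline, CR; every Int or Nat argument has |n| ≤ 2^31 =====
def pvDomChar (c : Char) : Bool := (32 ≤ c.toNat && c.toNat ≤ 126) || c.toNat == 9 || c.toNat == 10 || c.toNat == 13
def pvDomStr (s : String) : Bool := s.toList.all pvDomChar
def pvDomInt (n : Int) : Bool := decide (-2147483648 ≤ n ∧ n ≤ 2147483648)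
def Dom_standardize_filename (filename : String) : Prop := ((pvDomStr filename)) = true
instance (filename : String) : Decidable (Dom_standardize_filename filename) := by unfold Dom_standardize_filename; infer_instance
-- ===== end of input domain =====

-- B rebuilds the name part in one character scan with a new-word flag instead of A's
-- replace/split/capitalize/join/replace pipeline; same return value, no side effects.

-- ===== PORT A =====
-- str.capitalize(): first char upper-cased, rest lower-cased (exact on ASCII)
def capPy (w : List Char) : List Char :=
  match w with
  | [] => []
  | c :: rest => PySem.Chars.upperChar c :: PySem.Chars.lower rest

def standardize_filename (filename : String) : String :=
  let cs := filename.toList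
  if PySem.Chars.isIn ['.'] cs then
    -- rsplit('.', 1): split at the LAST '.' (hand port, exact here since '.' is present)
    let i := (PySem.Chars.rfind cs ['.']).toNat
    let name := cs.take i
    let ext := PySem.Chars.lower (cs.drop (i + 1))
    let n1 := PySem.Chars.replace name ['_'] [' ']
    let n2 := PySem.Chars.replace n1 ['-'] [' ']
    let n3 := PySem.Chars.join [' '] ((PySem.Chars.split₀ n2).map capPy)
    let n4 := PySem.Chars.replace n3 [' '] ['_']
    String.ofList (n4 ++ '.' :: ext)
  else
    filename

-- ===== PORT B =====
def sepB (c : Char) : Bool := c == '_' || c == '-' || PySem.Chars.isspace c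

def altGo : List Char → List Char → Bool → List Char
  | [], out, _ => out
  | c :: rest, out, newWord =>
    if sepB c then
      altGo rest out true
    else
      altGo rest
        (out ++ (if newWord && !out.isEmpty then ['_'] else [])
             ++ [if newWord then PySem.Chars.upperChar c else PySem.Chars.lowerChar c])
        false

def standardize_filename_alt (filename : String) : String :=
  let cs := filename.toList
  if PySem.Chars.isIn ['.'] cs then
    -- same rsplit('.', 1) guard as Source B
    let i := (PySem.Chars.rfind cs ['.']).toNat
    let name := cs.take i
    let ext := PySem.Chars.lower (cs.drop (i + 1))
    String.ofList (altGo name [] true ++ '.' :: ext)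
  else
    filename

-- ===== PRECONDITION & SPEC =====
def Spec_standardize_filename (filename : String) (out : String) : Prop := out = standardize_filename_alt filename
instance (filename : String) (out : String) : Decidable (Spec_standardize_filename filename out) := by unfold Spec_standardize_filename; infer_instance

-- ===== CLAIM (what is proved, stated in full; the proofs are below) =====
def Claim_equal_standardize_filename : Prop := ∀ (filename : String), Dom_standardize_filename filename → Spec_standardize_filename filename (standardize_filename filename)

-- ===== LEMMAS AND PROOFS =====

-- the combined character substitution performed by A's two replaces
def mRepl (c : Char) : Char := if c == '_' then ' ' else if c == '-' then ' ' else c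

-- words of a char list split on sepB, with the pending word `cur`
def wordsAux : List Char → List Char → List (List Char)
  | [], cur => if cur.isEmpty then [] else [cur]
  | c :: rest, cur =>
    if sepB c then (if cur.isEmpty then wordsAux rest [] else cur :: wordsAux rest [])
    else wordsAux rest (cur ++ [c])

-- '_'-prefixed rendering of every word (the non-first-word case in B)
def flatWords (ws : List (List Char)) : List Char := ws.flatMap (fun w => '_' :: capPy w)

-- A1: a single-character replace is a map
theorem replace_go_single (o n : Char) :
    ∀ (s acc : List Char),
      PySem.Chars.replace.go [o] [n] s.length s acc
        = acc.reverse ++ s.map (fun c => if c == o then n else c) := by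
  intro s
  induction s with
  | nil => intro acc; simp [PySem.Chars.replace.go]
  | cons c t ih =>
    intro acc
    by_cases h : c = o
    · subst h
      simp [PySem.Chars.replace.go, List.isPrefixOf, ih]
    · have : ([o].isPrefixOf (c :: t)) = false := by
        simp [List.isPrefixOf]; exact fun hh => absurd hh.symm h
      simp [PySem.Chars.replace.go, this, ih, h]

theorem replace_single (o n : Char) (s : List Char) :
    PySem.Chars.replace s [o] [n] = s.map (fun c => if c == o then n else c) := by
  simp [PySem.Chars.replace, replace_go_single]

-- the substituted character is whitespace exactly on B's separators
theorem isspace_mRepl (c : Char) : PySem.Chars.isspace (mRepl c) = sepB c := by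
  by_cases h1 : c = '_'
  · subst h1; decide
  · by_cases h2 : c = '-'
    · subst h2; decide
    · simp [mRepl, sepB, h1, h2]

-- unpack a failed separator test
theorem sepB_false (c : Char) (h : sepB c = false) :
    c ≠ '_' ∧ c ≠ '-' ∧ PySem.Chars.isspace c = false := by
  simp only [sepB, Bool.or_eq_false_iff, beq_eq_false_iff_ne, ne_eq] at h
  exact ⟨h.1.1, h.1.2, h.2⟩

theorem mRepl_of_not_sep (c : Char) (h : sepB c = false) : mRepl c = c := by
  obtain ⟨h1, h2, _⟩ := sepB_false c h
  simp [mRepl, h1, h2]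

-- A2: split₀ after the substitution is wordsAux
theorem split_go_words :
    ∀ (s cur : List Char) (acc : List (List Char)),
      PySem.Chars.split₀.go (s.map mRepl) cur acc = acc.reverse ++ wordsAux s cur.reverse := by
  intro s
  induction s with
  | nil =>
    intro cur acc
    by_cases h : cur = [] <;> simp [PySem.Chars.split₀.go, wordsAux, h]
  | cons c rest ih =>
    intro cur acc
    by_cases hs : sepB c = true
    · have hsp : PySem.Chars.isspace (mRepl c) = true := by rw [isspace_mRepl]; exact hs
      by_cases h : cur = []
      · simp [PySem.Chars.split₀.go, hsp, wordsAux, h, hs, ih]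
      · simp [PySem.Chars.split₀.go, hsp, wordsAux, h, hs, ih]
    · have hs' : sepB c = false := by simpa using hs
      have hm : mRepl c = c := mRepl_of_not_sep c hs'
      have hsp : PySem.Chars.isspace c = false := (sepB_false c hs').2.2
      simp [PySem.Chars.split₀.go, hm, hsp, wordsAux, hs', ih]

-- words carry no separator characters
theorem words_no_sep :
    ∀ (s cur : List Char), (∀ c ∈ cur, sepB c = false) →
      ∀ w ∈ wordsAux s cur, ∀ c ∈ w, sepB c = false := by
  intro s
  induction s with
  | nil =>
    intro cur hcur w hw
    by_cases h : cur = [] <;> simp [wordsAux, h] at hw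
    · subst hw; exact hcur
  | cons c rest ih =>
    intro cur hcur w hw
    by_cases hs : sepB c = true
    · by_cases h : cur = []
      · simp [wordsAux, hs, h] at hw
        exact ih [] (by simp) w hw
      · simp [wordsAux, hs, h] at hw
        rcases hw with hw | hw
        · subst hw; exact hcur
        · exact ih [] (by simp) w hw
    · have hs' : sepB c = false := by simpa using hs
      simp [wordsAux, hs'] at hw
      refine ih (cur ++ [c]) ?_ w hw
      intro x hx
      rcases List.mem_append.1 hx with hx | hx
      · exact hcur x hx
      · simp at hx; subst hx; exact hs'

-- mapping a char substitution through intercalate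
theorem map_intercalate (g : Char → Char) :
    ∀ (ps : List (List Char)),
      List.map g (List.intercalate [' '] ps) = List.intercalate [g ' '] (ps.map (List.map g)) := by
  intro ps
  induction ps with
  | nil => simp [List.intercalate]
  | cons x r ih =>
    cases r with
    | nil => simp [List.intercalate]
    | cons y t =>
      have h1 : List.intercalate [' '] (x :: y :: t) = x ++ [' '] ++ List.intercalate [' '] (y :: t) := by
        simp [List.intercalate, List.intersperse]
      have h2 : List.intercalate [g ' '] ((x :: y :: t).map (List.map g))
          = List.map g x ++ [g ' '] ++ List.intercalate [g ' '] ((y :: t).map (List.map g)) := by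
        simp [List.intercalate]
      rw [h1, h2, ← ih]; simp

-- case-mapped non-separator characters stay non-space
theorem upperChar_ne_space (c : Char) (h : c ≠ ' ') : PySem.Chars.upperChar c ≠ ' ' := by
  unfold PySem.Chars.upperChar
  split
  · rename_i hl
    simp only [PySem.Chars.islower, Bool.and_eq_true, decide_eq_true_eq] at hl
    have h1 : 97 ≤ c.toNat := hl.1
    have h2 : c.toNat ≤ 122 := hl.2
    intro hc
    have h3 : (Char.ofNat (c.toNat - 32)).toNat = c.toNat - 32 := by
      rw [Char.toNat_ofNat, if_pos]
      exact Or.inl (by omega)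
    rw [hc] at h3
    simp at h3
    omega
  · exact h

theorem lowerChar_ne_space (c : Char) (h : c ≠ ' ') : PySem.Chars.lowerChar c ≠ ' ' := by
  unfold PySem.Chars.lowerChar
  split
  · rename_i hu
    simp only [PySem.Chars.isupper, Bool.and_eq_true, decide_eq_true_eq] at hu
    have h1 : 65 ≤ c.toNat := hu.1
    have h2 : c.toNat ≤ 90 := hu.2
    intro hc
    have h3 : (Char.ofNat (c.toNat + 32)).toNat = c.toNat + 32 := by
      rw [Char.toNat_ofNat, if_pos]
      exact Or.inl (by omega)
    rw [hc] at h3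
    simp at h3
    omega
  · exact h

-- the final space→underscore map does not touch a capitalized separator-free word
theorem map_g_capPy (w : List Char) (hw : ∀ c ∈ w, sepB c = false) :
    List.map (fun c => if c == ' ' then '_' else c) (capPy w) = capPy w := by
  cases w with
  | nil => simp [capPy]
  | cons c rest =>
    have hc : c ≠ ' ' := by
      intro h; subst h
      exact Bool.false_ne_true ((hw ' ' (by simp)).symm.trans (by decide))
    simp only [capPy, List.map_cons, PySem.Chars.lower]
    rw [List.map_map]
    have h1 : (if (PySem.Chars.upperChar c == ' ') = true then '_' else PySem.Chars.upperChar c)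
        = PySem.Chars.upperChar c := by
      rw [if_neg]
      simp [upperChar_ne_space c hc]
    rw [h1]
    congr 1
    apply List.map_congr_left
    intro x hx
    have hx' : x ≠ ' ' := by
      intro h; subst h
      exact Bool.false_ne_true ((hw ' ' (by simp [hx])).symm.trans (by decide))
    simp [Function.comp, lowerChar_ne_space x hx']

-- A's whole name pipeline computes the underscore-intercalated capitalized words
theorem pipelineA (name : List Char) :
    PySem.Chars.replace
      (PySem.Chars.join [' ']
        ((PySem.Chars.split₀
          (PySem.Chars.replace (PySem.Chars.replace name ['_'] [' ']) ['-'] [' '])).map capPy))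
      [' '] ['_']
    = List.intercalate ['_'] ((wordsAux name []).map capPy) := by
  have hmm : PySem.Chars.replace (PySem.Chars.replace name ['_'] [' ']) ['-'] [' ']
      = name.map mRepl := by
    rw [replace_single, replace_single, List.map_map]
    apply List.map_congr_left
    intro c _
    simp only [Function.comp]
    by_cases h1 : c = '_'
    · subst h1; simp [mRepl]
    · by_cases h2 : c = '-'
      · subst h2; simp [mRepl]
      · simp [mRepl, h1, h2]
  rw [hmm]
  have hsplit : PySem.Chars.split₀ (name.map mRepl) = wordsAux name [] := by
    have := split_go_words name [] []
    simpa [PySem.Chars.split₀] using this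
  rw [hsplit, replace_single, PySem.Chars.join, map_intercalate]
  have : ((wordsAux name []).map capPy).map
      (List.map fun c => if c == ' ' then '_' else c) = (wordsAux name []).map capPy := by
    rw [List.map_map]
    apply List.map_congr_left
    intro w hw
    exact map_g_capPy w (words_no_sep name [] (by simp) w hw)
  rw [this]
  norm_num

-- B-side invariant: the scan renders the words of wordsAux
theorem capPy_append (cur : List Char) (hc : cur ≠ []) (c : Char) :
    capPy (cur ++ [c]) = capPy cur ++ [PySem.Chars.lowerChar c] := by
  cases cur with
  | nil => exact absurd rfl hc
  | cons a t => simp [capPy, PySem.Chars.lower]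

theorem altGo_step (c : Char) (rest out : List Char) (nw : Bool) :
    altGo (c :: rest) out nw =
      if sepB c then altGo rest out true
      else altGo rest
        (out ++ (if nw && !out.isEmpty then ['_'] else [])
             ++ [if nw then PySem.Chars.upperChar c else PySem.Chars.lowerChar c]) false := rfl

theorem capPy_ne_nil (cur : List Char) (hc : cur ≠ []) : capPy cur ≠ [] := by
  cases cur with
  | nil => exact absurd rfl hc
  | cons a t => simp [capPy]

-- '_'-intercalation of a nonempty word list, word by word
theorem intercalate_underscore (w : List Char) :
    ∀ ws : List (List Char),
      List.intercalate ['_'] (w :: ws) = w ++ ws.flatMap (fun v => '_' :: v) := by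
  intro ws
  induction ws generalizing w with
  | nil => simp [List.intercalate]
  | cons v t ih =>
    have h1 : List.intercalate ['_'] (w :: v :: t) = w ++ ['_'] ++ List.intercalate ['_'] (v :: t) := by
      simp [List.intercalate, List.intersperse]
    rw [h1, ih v]
    simp

theorem altGo_spec :
    ∀ (s : List Char),
      (∀ out₀ : List Char,
        altGo s out₀ true
          = out₀ ++ (if out₀.isEmpty then List.intercalate ['_'] ((wordsAux s []).map capPy)
                     else flatWords (wordsAux s []))) ∧
      (∀ (cur out₀ : List Char), cur ≠ [] →
        altGo s (out₀ ++ (if out₀.isEmpty then [] else ['_']) ++ capPy cur) false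
          = out₀ ++ (if out₀.isEmpty then List.intercalate ['_'] ((wordsAux s cur).map capPy)
                     else flatWords (wordsAux s cur))) := by
  intro s
  induction s with
  | nil =>
    constructor
    · intro out₀
      by_cases h : out₀ = [] <;> simp [altGo, wordsAux, h, flatWords, List.intercalate]
    · intro cur out₀ hc
      by_cases h : out₀ = [] <;>
        simp [altGo, wordsAux, h, hc, flatWords, List.intercalate]
  | cons c rest ih =>
    obtain ⟨ihP, ihQ⟩ := ih
    constructor
    · intro out₀
      by_cases hs : sepB c = true
      · rw [altGo_step, if_pos hs, ihP out₀]
        simp [wordsAux, hs]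
      · have hs' : sepB c = false := by simpa using hs
        rw [altGo_step, if_neg (by simp [hs'])]
        have hcap : capPy [c] = [PySem.Chars.upperChar c] := by simp [capPy, PySem.Chars.lower]
        have hq := ihQ [c] out₀ (by simp)
        rw [hcap] at hq
        rw [show wordsAux (c :: rest) [] = wordsAux rest [c] by simp [wordsAux, hs']]
        rw [← hq]
        congr 1
        by_cases h : out₀ = [] <;> simp [h]
    · intro cur out₀ hc
      by_cases hs : sepB c = true
      · -- separator: close the word, continue in new-word state with nonempty out
        rw [altGo_step, if_pos hs, ihP _]
        have hie : ((out₀ ++ (if out₀.isEmpty then [] else ['_'])) ++ capPy cur).isEmpty = false := by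
          simp [capPy_ne_nil cur hc]
        rw [hie]
        rw [show wordsAux (c :: rest) cur = cur :: wordsAux rest [] by
          simp [wordsAux, hs, hc]]
        by_cases h : out₀ = [] <;>
          simp [h, flatWords, intercalate_underscore, List.flatMap_map, List.append_assoc]
      · have hs' : sepB c = false := by simpa using hs
        rw [altGo_step, if_neg (by simp [hs'])]
        have hrw : ((((out₀ ++ (if out₀.isEmpty then [] else ['_'])) ++ capPy cur) ++
              (if false && !((out₀ ++ (if out₀.isEmpty then [] else ['_'])) ++ capPy cur).isEmpty then ['_'] else [])
              ++ [if false then PySem.Chars.upperChar c else PySem.Chars.lowerChar c]) : List Char)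
            = (out₀ ++ (if out₀.isEmpty then [] else ['_'])) ++ capPy (cur ++ [c]) := by
          rw [capPy_append cur hc c]; simp
        rw [hrw, ihQ (cur ++ [c]) out₀ (by simp)]
        rw [show wordsAux (c :: rest) cur = wordsAux rest (cur ++ [c]) by simp [wordsAux, hs']]

-- ===== VERDICT (by name: the statement is the Claim_ definition above) =====
theorem standardize_filename_spec : Claim_equal_standardize_filename := by
  intro filename _
  unfold Spec_standardize_filename standardize_filename standardize_filename_alt
  by_cases h : PySem.Chars.isIn ['.'] filename.toList = true
  · have hB : ∀ X : List Char,
        altGo X [] true = List.intercalate ['_'] ((wordsAux X []).map capPy) := by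
      intro X
      have := (altGo_spec X).1 []
      simpa using this
    simp [h, pipelineA, hB]
  · simp [h]
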